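-- pv_equiv track=rewrite | github.com/AlexanderAdedeji/device_and_agent_management | commonlib/commonlib/validators/lasrra.py | _generate_lasrra_id_checksum_v2
-- ===== SOURCE A (Python) =====
-- VALUE_TO_SUBTRACT = 45
--
-- MODULO = 28
--
-- CHECKSUM_STRING = "0123456789ABCEFGHJKMNPRTUVWXY"
--
-- def _generate_lasrra_id_checksum_v2(id: str) -> str:
--     total_weighted_sum = 0
--
--     for i, ch in enumerate(id[:-1]):
--         current_weight = ord(ch) - VALUE_TO_SUBTRACT
--         if (i + 1) % 2 == 0:
--             current_weight *= 2
--         total_weighted_sum += current_weight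
--
--     checksum_string_idx = MODULO - (total_weighted_sum % MODULO)
--     return CHECKSUM_STRING[checksum_string_idx]
-- ===== SOURCE B (Python) =====
-- VALUE_TO_SUBTRACT = 45
--
-- MODULO = 28
--
-- CHECKSUM_STRING = "0123456789ABCEFGHJKMNPRTUVWXY"
--
-- def _generate_lasrra_id_checksum_v2(id: str) -> str:
--     # Consume the body two characters at a time: no per-character parity branch.
--     body = id[:-1]
--     n = len(body)
--     total = 0
--     i = 0
--     while i + 1 < n:
--         total += (ord(body[i]) - VALUE_TO_SUBTRACT) + 2 * (ord(body[i + 1]) - VALUE_TO_SUBTRACT)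
--         i += 2
--     if i < n:
--         total += ord(body[i]) - VALUE_TO_SUBTRACT
--     return CHECKSUM_STRING[MODULO - total % MODULO]
-- ===== Notes on version B (the rewrite author's own statement) =====
-- stated objective: alternative
-- what changed: B replaces A's enumerate loop with a per-index parity branch by a loop that consumes the body two characters at a time (plain + doubled), adding a single trailing character if the body length is odd; no index bookkeeping or branch per character.
import Mathlib
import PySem

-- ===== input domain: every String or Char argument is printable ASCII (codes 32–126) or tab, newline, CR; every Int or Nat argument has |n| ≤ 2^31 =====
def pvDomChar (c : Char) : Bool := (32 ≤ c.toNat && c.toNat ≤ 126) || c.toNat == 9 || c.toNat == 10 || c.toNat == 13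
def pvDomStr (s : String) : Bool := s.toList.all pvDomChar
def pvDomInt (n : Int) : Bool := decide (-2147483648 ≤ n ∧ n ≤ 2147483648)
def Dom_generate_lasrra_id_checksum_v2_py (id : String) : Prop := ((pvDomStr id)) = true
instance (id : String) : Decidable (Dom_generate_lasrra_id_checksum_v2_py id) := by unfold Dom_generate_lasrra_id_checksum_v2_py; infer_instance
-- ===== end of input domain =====

-- B replaces the per-character parity branch by a two-characters-per-step loop (alternative decomposition, same cost).


-- ===== PORT A =====
-- ord(ch) - VALUE_TO_SUBTRACT  (shared constant-level helper; both Pythons use ord(c) - 45)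
def pvOrdW (c : Char) : Int := (c.toNat : Int) - 45

def generate_lasrra_id_checksum_v2_py (id : String) : String :=
  let total_weighted_sum :=
    (PySem.List.enumerate (PySem.Str.slice id none (some (-1))).toList 0).foldl
      (fun total p =>
        let cw := pvOrdW p.2
        let cw := if PySem.Int.mod (p.1 + 1) 2 = 0 then cw * 2 else cw
        total + cw) 0
  let idx := (28 : Int) - PySem.Int.mod total_weighted_sum 28
  -- CHECKSUM_STRING[idx]: idx is always 1..28 < 29 so Python never raises; none branch is unreachable
  (PySem.Str.pyGet? "0123456789ABCEFGHJKMNPRTUVWXY" idx).elim "" (fun c => String.ofList [c])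

-- ===== PORT B =====
-- the while loop of Source B: consume two characters per step, one trailing add if odd length
def pvPairTotal : List Char -> Int -> Int
  | [], total => total
  | [a], total => total + pvOrdW a
  | a :: b :: t, total => pvPairTotal t (total + (pvOrdW a + 2 * pvOrdW b))

def generate_lasrra_id_checksum_v2_py_alt (id : String) : String :=
  let total := pvPairTotal (PySem.Str.slice id none (some (-1))).toList 0
  let idx := (28 : Int) - PySem.Int.mod total 28
  (PySem.Str.pyGet? "0123456789ABCEFGHJKMNPRTUVWXY" idx).elim "" (fun c => String.ofList [c])

-- ===== PRECONDITION & SPEC =====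
def Spec_generate_lasrra_id_checksum_v2_py (id : String) (out : String) : Prop := out = generate_lasrra_id_checksum_v2_py_alt id
instance (id : String) (out : String) : Decidable (Spec_generate_lasrra_id_checksum_v2_py id out) := by unfold Spec_generate_lasrra_id_checksum_v2_py; infer_instance

-- ===== CLAIM (what is proved, stated in full; the proofs are below) =====
def Claim_equal_generate_lasrra_id_checksum_v2_py : Prop := ∀ (id : String), Dom_generate_lasrra_id_checksum_v2_py id → Spec_generate_lasrra_id_checksum_v2_py id (generate_lasrra_id_checksum_v2_py id)

-- ===== LEMMAS AND PROOFS =====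
theorem pvKey (l : List Char) (s total : Int) :
    (PySem.List.enumerate l (2 * s)).foldl
      (fun total p =>
        let cw := pvOrdW p.2
        let cw := if PySem.Int.mod (p.1 + 1) 2 = 0 then cw * 2 else cw
        total + cw) total = pvPairTotal l total :=
  match l with
  | [] => by simp [PySem.List.enumerate, pvPairTotal]
  | [a] => by
      simp [PySem.List.enumerate, pvPairTotal, PySem.Int.mod, Int.fmod_eq_emod]
  | a :: b :: t => by
      have h1 : PySem.Int.mod (2 * s + 1) 2 = 1 := by
        simp [PySem.Int.mod, Int.fmod_eq_emod]
      have h2 : PySem.Int.mod (2 * s + 1 + 1) 2 = 0 := by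
        simp [PySem.Int.mod, Int.fmod_eq_emod]; omega
      have e2 : 2 * s + 1 + 1 = 2 * (s + 1) := by ring
      have ih := pvKey t (s + 1) (total + (pvOrdW a + 2 * pvOrdW b))
      simp only [PySem.List.enumerate, List.foldl, pvPairTotal] at *
      rw [h1, h2] at *
      rw [e2]
      rw [← ih]
      norm_num
      ring_nf

-- ===== VERDICT (by name: the statement is the Claim_ definition above) =====
theorem generate_lasrra_id_checksum_v2_py_spec : Claim_equal_generate_lasrra_id_checksum_v2_py := by
  intro id _
  unfold Spec_generate_lasrra_id_checksum_v2_py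
  unfold generate_lasrra_id_checksum_v2_py generate_lasrra_id_checksum_v2_py_alt
  have := pvKey (PySem.Str.slice id none (some (-1))).toList 0 0
  simp only [mul_zero] at this
  rw [this]
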